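-- pv_equiv track=rewrite | github.com/KohsukeIde/3D-NEPA | nepa3d/models/patch_nepa.py | _normalize_patch_mode_token
-- ===== SOURCE A (Python) =====
-- def _normalize_patch_mode_token(token: str) -> tuple[str, bool]:
--     mode = str(token).strip().lower().replace("-", "_")
--     rev = False
--     while mode.startswith("rev_"):
--         rev = not rev
--         mode = mode[len("rev_") :]
--     while mode.endswith("_rev"):
--         rev = not rev
--         mode = mode[: -len("_rev")]
--     return mode, rev
-- ===== SOURCE B (Python) =====
-- def _normalize_patch_mode_token(token: str) -> tuple[str, bool]:
--     mode = str(token).strip().lower().replace("-", "_")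
--     # count the run of leading "rev_" copies by indexing, without re-slicing
--     n1 = 0
--     while mode[4 * n1 : 4 * n1 + 4] == "rev_":
--         n1 += 1
--     rest = mode[4 * n1 :]
--     m = len(rest)
--     # count the run of trailing "_rev" copies
--     n2 = 0
--     while 4 * n2 + 4 <= m and rest[m - 4 * n2 - 4 : m - 4 * n2] == "_rev":
--         n2 += 1
--     return rest[: m - 4 * n2], (n1 + n2) % 2 == 1
-- ===== Notes on version B (the rewrite author's own statement) =====
-- stated objective: alternative
-- what changed: Instead of toggling a boolean flag while repeatedly re-slicing the string, B counts the length of the leading run of reversal prefixes and of the trailing run of reversal suffixes by indexing into the string, slices once, and computes the flag as the parity of the two counts.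
import Mathlib
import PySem

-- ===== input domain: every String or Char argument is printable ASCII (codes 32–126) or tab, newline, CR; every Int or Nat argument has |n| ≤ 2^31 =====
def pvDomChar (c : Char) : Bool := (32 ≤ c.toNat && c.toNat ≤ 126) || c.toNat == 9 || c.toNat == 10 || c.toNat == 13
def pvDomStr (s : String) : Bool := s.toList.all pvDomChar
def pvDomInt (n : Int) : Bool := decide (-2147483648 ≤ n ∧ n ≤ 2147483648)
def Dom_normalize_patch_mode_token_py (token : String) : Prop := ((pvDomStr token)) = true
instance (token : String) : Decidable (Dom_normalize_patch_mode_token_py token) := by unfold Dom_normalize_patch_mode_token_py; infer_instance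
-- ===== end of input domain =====

-- B counts the leading and trailing runs of reversal affixes by indexing into the original
-- string and derives the flag as a parity, instead of A's toggle-and-reslice loops
-- (objective: alternative; same observable behaviour).

-- ===== PORT A =====
-- while mode.startswith("rev_"): rev = not rev; mode = mode[4:]
def aLoop1 (mode : List Char) (rev : Bool) : List Char × Bool :=
  if h : PySem.Chars.startswith mode ['r', 'e', 'v', '_'] = true then
    aLoop1 (PySem.List.slice mode (some 4) none) (!rev)
  else (mode, rev)
termination_by mode.length
decreasing_by
  have hp : (['r', 'e', 'v', '_'] : List Char) <+: mode := (PySem.Chars.startswith_iff _ _).mp h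
  have h4 : 4 ≤ mode.length := by simpa using hp.length_le
  rw [PySem.List.slice_from mode (by norm_num : (0:Int) ≤ 4)]
  simp only [List.length_drop]
  omega

-- while mode.endswith("_rev"): rev = not rev; mode = mode[:-4]
def aLoop2 (mode : List Char) (rev : Bool) : List Char × Bool :=
  if h : PySem.Chars.endswith mode ['_', 'r', 'e', 'v'] = true then
    aLoop2 (PySem.List.slice mode none (some (-4))) (!rev)
  else (mode, rev)
termination_by mode.length
decreasing_by
  have hp : (['_', 'r', 'e', 'v'] : List Char) <:+ mode := (PySem.Chars.endswith_iff _ _).mp h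
  have h4 : 4 ≤ mode.length := by simpa using hp.length_le
  rw [PySem.List.slice_to_neg_ofNat mode 4 (by omega)]
  simp only [List.length_take]
  omega

def normalize_patch_mode_token_py (token : String) : String × Bool :=
  let mode := PySem.Chars.replace (PySem.Chars.lower (PySem.Chars.strip token.toList)) ['-'] ['_']
  let r1 := aLoop1 mode false
  let r2 := aLoop2 r1.1 r1.2
  (String.ofList r2.1, r2.2)

-- ===== PORT B =====
-- while mode[4*n1 : 4*n1+4] == "rev_": n1 += 1
def bCount1 (mode : List Char) (n1 : Nat) : Nat :=
  if h : PySem.List.slice mode (some ((4 * n1 : Nat) : Int)) (some ((4 * n1 + 4 : Nat) : Int))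
           = ['r', 'e', 'v', '_'] then
    bCount1 mode (n1 + 1)
  else n1
termination_by mode.length - 4 * n1
decreasing_by
  have h' := congrArg List.length h
  rw [PySem.List.slice_natCast] at h'
  simp only [List.length_take, List.length_drop, List.length_cons, List.length_nil] at h'
  omega

-- while 4*n2+4 <= m and rest[m-4*n2-4 : m-4*n2] == "_rev": n2 += 1   (m = len(rest))
def bCount2 (rest : List Char) (n2 : Nat) : Nat :=
  if h : 4 * n2 + 4 ≤ rest.length ∧
         PySem.List.slice rest (some ((rest.length - 4 * n2 - 4 : Nat) : Int))
           (some ((rest.length - 4 * n2 : Nat) : Int)) = ['_', 'r', 'e', 'v'] then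
    bCount2 rest (n2 + 1)
  else n2
termination_by rest.length - 4 * n2
decreasing_by
  omega

def normalize_patch_mode_token_py_alt (token : String) : String × Bool :=
  let mode := PySem.Chars.replace (PySem.Chars.lower (PySem.Chars.strip token.toList)) ['-'] ['_']
  let n1 := bCount1 mode 0
  let rest := PySem.List.slice mode (some ((4 * n1 : Nat) : Int)) none
  let n2 := bCount2 rest 0
  (String.ofList (PySem.List.slice rest none (some ((rest.length - 4 * n2 : Nat) : Int))),
   decide ((n1 + n2) % 2 = 1))

-- ===== PRECONDITION & SPEC =====
def Spec_normalize_patch_mode_token_py (token : String) (out : String × Bool) : Prop := out = normalize_patch_mode_token_py_alt token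
instance (token : String) (out : String × Bool) : Decidable (Spec_normalize_patch_mode_token_py token out) := by unfold Spec_normalize_patch_mode_token_py; infer_instance

-- ===== CLAIM (what is proved, stated in full; the proofs are below) =====
def Claim_equal_normalize_patch_mode_token_py : Prop := ∀ (token : String), Dom_normalize_patch_mode_token_py token → Spec_normalize_patch_mode_token_py token (normalize_patch_mode_token_py token)

-- ===== LEMMAS AND PROOFS =====

theorem parity_xor (a b : Nat) :
    xor (decide (a % 2 = 1)) (decide (b % 2 = 1)) = decide ((a + b) % 2 = 1) := by
  rcases Nat.mod_two_eq_zero_or_one a with h | h <;>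
    rcases Nat.mod_two_eq_zero_or_one b with h' | h' <;>
      simp [Nat.add_mod, h, h']

theorem parity_succ (c : Nat) :
    (!decide (c % 2 = 1)) = decide ((c + 1) % 2 = 1) := by
  rcases Nat.mod_two_eq_zero_or_one c with h | h <;> simp [Nat.add_mod, h]

-- shifting B's scan index past one leading copy equals scanning the 4-dropped string
theorem bCount1_shift (fuel : Nat) (mode : List Char) (n1 : Nat)
    (hf : mode.length ≤ 4 * n1 + fuel) :
    bCount1 mode (n1 + 1) = bCount1 (mode.drop 4) n1 + 1 := by
  induction fuel generalizing n1 with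
  | zero =>
    have hA : ¬ (PySem.List.slice mode (some ((4 * (n1 + 1) : Nat) : Int))
        (some ((4 * (n1 + 1) + 4 : Nat) : Int)) = ['r', 'e', 'v', '_']) := by
      intro h
      have h' := congrArg List.length h
      rw [PySem.List.slice_natCast] at h'
      simp only [List.length_take, List.length_drop, List.length_cons, List.length_nil] at h'
      omega
    have hB : ¬ (PySem.List.slice (mode.drop 4) (some ((4 * n1 : Nat) : Int))
        (some ((4 * n1 + 4 : Nat) : Int)) = ['r', 'e', 'v', '_']) := by
      intro h
      have h' := congrArg List.length h
      rw [PySem.List.slice_natCast] at h'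
      simp only [List.length_take, List.length_drop, List.length_cons, List.length_nil] at h'
      omega
    conv_lhs => rw [bCount1]
    conv_rhs => rw [bCount1]
    rw [dif_neg hA, dif_neg hB]
  | succ k ih =>
    have e : PySem.List.slice mode (some ((4 * (n1 + 1) : Nat) : Int))
               (some ((4 * (n1 + 1) + 4 : Nat) : Int))
           = PySem.List.slice (mode.drop 4) (some ((4 * n1 : Nat) : Int))
               (some ((4 * n1 + 4 : Nat) : Int)) := by
      rw [PySem.List.slice_natCast, PySem.List.slice_natCast, List.drop_drop]
      have h1 : 4 * (n1 + 1) + 4 - 4 * (n1 + 1) = 4 * n1 + 4 - 4 * n1 := by omega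
      have h2 : 4 * (n1 + 1) = 4 + 4 * n1 := by omega
      rw [h1, h2]
    conv_lhs => rw [bCount1]
    conv_rhs => rw [bCount1]
    by_cases hc : PySem.List.slice (mode.drop 4) (some ((4 * n1 : Nat) : Int))
        (some ((4 * n1 + 4 : Nat) : Int)) = ['r', 'e', 'v', '_']
    · rw [dif_pos (e.trans hc), dif_pos hc]
      exact ih (n1 + 1) (by omega)
    · rw [dif_neg (fun h => hc (e.symm.trans h)), dif_neg hc]

theorem bCount2_bound (rest : List Char) (n2 : Nat) (h : 4 * n2 ≤ rest.length) :
    4 * bCount2 rest n2 ≤ rest.length := by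
  rw [bCount2]
  split
  · next hc => exact bCount2_bound rest (n2 + 1) (by omega)
  · omega
termination_by rest.length - 4 * n2
decreasing_by omega

-- shifting B's suffix scan past one trailing copy equals scanning the 4-shortened string
theorem bCount2_shift (fuel : Nat) (m : List Char) (n2 : Nat)
    (h4 : 4 ≤ m.length) (hf : m.length ≤ 4 * n2 + fuel) :
    bCount2 m (n2 + 1) = bCount2 (m.take (m.length - 4)) n2 + 1 := by
  have hlen : (m.take (m.length - 4)).length = m.length - 4 := by
    simp only [List.length_take]; omega
  induction fuel generalizing n2 with
  | zero =>
    conv_lhs => rw [bCount2]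
    conv_rhs => rw [bCount2]
    rw [dif_neg (by simp only [not_and]; omega),
        dif_neg (by simp only [hlen, not_and]; omega)]
  | succ k ih =>
    by_cases h1 : 4 * n2 + 4 ≤ m.length - 4
    · have e : PySem.List.slice m (some ((m.length - 4 * (n2 + 1) - 4 : Nat) : Int))
                 (some ((m.length - 4 * (n2 + 1) : Nat) : Int))
             = PySem.List.slice (m.take (m.length - 4))
                 (some (((m.take (m.length - 4)).length - 4 * n2 - 4 : Nat) : Int))
                 (some (((m.take (m.length - 4)).length - 4 * n2 : Nat) : Int)) := by
        rw [PySem.List.slice_natCast, PySem.List.slice_natCast, List.drop_take, List.take_take,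
          hlen]
        have hmin : min (m.length - 4 - 4 * n2 - (m.length - 4 - 4 * n2 - 4))
            (m.length - 4 - (m.length - 4 - 4 * n2 - 4)) = 4 := by omega
        rw [hmin]
        have ha : m.length - 4 * (n2 + 1) - 4 = m.length - 4 - 4 * n2 - 4 := by omega
        rw [ha]
        have hb : m.length - 4 * (n2 + 1) - (m.length - 4 - 4 * n2 - 4) = 4 := by omega
        rw [hb]
      conv_lhs => rw [bCount2]
      conv_rhs => rw [bCount2]
      by_cases hc : PySem.List.slice (m.take (m.length - 4))
          (some (((m.take (m.length - 4)).length - 4 * n2 - 4 : Nat) : Int))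
          (some (((m.take (m.length - 4)).length - 4 * n2 : Nat) : Int)) = ['_', 'r', 'e', 'v']
      · rw [dif_pos ⟨by omega, e.trans hc⟩, dif_pos ⟨by rw [hlen]; omega, hc⟩]
        exact ih (n2 + 1) (by omega)
      · rw [dif_neg (fun h => hc (e.symm.trans h.2)), dif_neg (fun h => hc h.2)]
    · conv_lhs => rw [bCount2]
      conv_rhs => rw [bCount2]
      rw [dif_neg (by simp only [not_and]; omega),
          dif_neg (by simp only [hlen, not_and]; omega)]

-- A's prefix loop computes B's leading count and its parity
theorem aLoop1_eq (mode : List Char) (rev : Bool) :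
    aLoop1 mode rev
      = (mode.drop (4 * bCount1 mode 0), xor rev (decide (bCount1 mode 0 % 2 = 1))) := by
  rw [aLoop1]
  split
  · next h =>
    have hp : (['r', 'e', 'v', '_'] : List Char) <+: mode := (PySem.Chars.startswith_iff _ _).mp h
    have htake : mode.take 4 = ['r', 'e', 'v', '_'] := by
      have := List.prefix_iff_eq_take.mp hp
      simpa using this.symm
    have hc0 : bCount1 mode 0 = bCount1 (mode.drop 4) 0 + 1 := by
      rw [bCount1]
      rw [dif_pos (by
        rw [PySem.List.slice_natCast]
        simpa using htake)]
      exact bCount1_shift mode.length mode 0 (by omega)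
    have hd : PySem.List.slice mode (some 4) none = mode.drop 4 := by
      rw [PySem.List.slice_from mode (by norm_num : (0:Int) ≤ 4)]
      rfl
    rw [hd, aLoop1_eq (mode.drop 4) (!rev), hc0]
    simp only [Prod.mk.injEq]
    constructor
    · rw [List.drop_drop]
      have : 4 + 4 * bCount1 (mode.drop 4) 0 = 4 * (bCount1 (mode.drop 4) 0 + 1) := by omega
      rw [this]
    · rw [← parity_succ]
      simp
  · next h =>
    have hc0 : bCount1 mode 0 = 0 := by
      rw [bCount1, dif_neg]
      intro hs
      apply h
      rw [PySem.List.slice_natCast] at hs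
      simp only [Nat.mul_zero, Nat.zero_add, List.drop_zero, Nat.sub_zero] at hs
      exact (PySem.Chars.startswith_iff _ _).mpr (List.prefix_iff_eq_take.mpr (by simpa using hs.symm))
    simp [hc0]
termination_by mode.length
decreasing_by
  next h =>
    have hp : (['r', 'e', 'v', '_'] : List Char) <+: mode := (PySem.Chars.startswith_iff _ _).mp h
    have h4 : 4 ≤ mode.length := by simpa using hp.length_le
    simp only [List.length_drop]
    omega

-- A's suffix loop computes B's trailing count and its parity
theorem aLoop2_eq (m : List Char) (rev : Bool) :
    aLoop2 m rev
      = (m.take (m.length - 4 * bCount2 m 0), xor rev (decide (bCount2 m 0 % 2 = 1))) := by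
  rw [aLoop2]
  split
  · next h =>
    have hp : (['_', 'r', 'e', 'v'] : List Char) <:+ m := (PySem.Chars.endswith_iff _ _).mp h
    have h4 : 4 ≤ m.length := by simpa using hp.length_le
    have hdropeq : m.drop (m.length - 4) = ['_', 'r', 'e', 'v'] := by
      have := List.suffix_iff_eq_drop.mp hp
      simpa using this.symm
    have hc0 : bCount2 m 0 = bCount2 (m.take (m.length - 4)) 0 + 1 := by
      rw [bCount2]
      rw [dif_pos ⟨by omega, by
        rw [PySem.List.slice_natCast]
        have h1 : m.length - 4 * 0 - (m.length - 4 * 0 - 4) = 4 := by omega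
        rw [h1]
        have h2 : m.length - 4 * 0 - 4 = m.length - 4 := by omega
        rw [h2, ← hdropeq]
        exact List.take_of_length_le (by simp only [List.length_drop]; omega)⟩]
      exact bCount2_shift m.length m 0 h4 (by omega)
    have ht : PySem.List.slice m none (some (-4)) = m.take (m.length - 4) := by
      rw [PySem.List.slice_to_neg_ofNat m 4 (by omega)]
    rw [ht, aLoop2_eq (m.take (m.length - 4)) (!rev), hc0]
    have hlen : (m.take (m.length - 4)).length = m.length - 4 := by
      simp only [List.length_take]; omega
    have hb : 4 * bCount2 (m.take (m.length - 4)) 0 ≤ m.length - 4 := by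
      have := bCount2_bound (m.take (m.length - 4)) 0 (by rw [hlen]; omega)
      rw [hlen] at this
      exact this
    simp only [Prod.mk.injEq]
    constructor
    · rw [List.take_take, hlen]
      have : min (m.length - 4 - 4 * bCount2 (m.take (m.length - 4)) 0)
          (m.length - 4) = m.length - 4 * (bCount2 (m.take (m.length - 4)) 0 + 1) := by omega
      rw [this]
    · rw [← parity_succ]
      simp
  · next h =>
    have hc0 : bCount2 m 0 = 0 := by
      rw [bCount2, dif_neg]
      rintro ⟨h1, h2⟩
      apply h
      rw [PySem.List.slice_natCast] at h2
      apply (PySem.Chars.endswith_iff _ _).mpr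
      apply List.suffix_iff_eq_drop.mpr
      have e : m.length - 4 * 0 - (m.length - 4 * 0 - 4) = 4 := by omega
      rw [e] at h2
      have e2 : m.length - (['_', 'r', 'e', 'v'] : List Char).length = m.length - 4 * 0 - 4 := by
        simp only [List.length_cons, List.length_nil]
        omega
      rw [e2, ← h2]
      have hle : (List.drop (m.length - 4 * 0 - 4) m).length ≤ 4 := by
        simp only [List.length_drop]
        omega
      exact List.take_of_length_le hle
    simp [hc0]
termination_by m.length
decreasing_by
  simp only [List.length_take]
  omega

-- ===== VERDICT (by name: the statement is the Claim_ definition above) =====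
theorem normalize_patch_mode_token_py_spec : Claim_equal_normalize_patch_mode_token_py := by
  intro token _
  show normalize_patch_mode_token_py token = normalize_patch_mode_token_py_alt token
  simp only [normalize_patch_mode_token_py, normalize_patch_mode_token_py_alt,
    aLoop1_eq, aLoop2_eq, PySem.List.slice_from_natCast, PySem.List.slice_to_natCast,
    Bool.false_xor, parity_xor]
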